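-- pv_equiv track=rewrite | github.com/yyned2501/tgbot-py | user_scripts/universal/calc_starting_bet.py | calc_starting_bet
-- ===== SOURCE A (Python) =====
-- def calc_starting_bet(c=50000000, max_n=20):
--
--     lines = []
--     header = f"{'连输次数':<6} | {'起手金额':>10} | {'最后一注':>10} | {'总投入':>15}"
--     separator = "-" * len(header)
--     lines.append(header)
--     lines.append(separator)
--
--     for n in range(1, max_n + 1):
--         power = 2 ** (n - 1)
--         x = abs((c - (power - 1)) // power)
--         last_bet = power * x + (power - 1)
--         total = sum(2 ** i * x + (2 ** i - 1) for i in range(n))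
--
--         line = f"{n:<6} | {x:>10,} | {last_bet:>10,} | {total:>15,}"
--         lines.append(line)
--
--     return "\n".join(lines)
-- ===== SOURCE B (Python) =====
-- def calc_starting_bet(c=50000000, max_n=20):
--     header = f"{'连输次数':<6} | {'起手金额':>10} | {'最后一注':>10} | {'总投入':>15}"
--     lines = [header, "-" * len(header)]
--     power = 1
--     for n in range(1, max_n + 1):
--         x = abs((c - power + 1) // power)
--         last_bet = power * x + power - 1
--         total = (x + 1) * (2 * power - 1) - n
--         lines.append(f"{n:<6} | {x:>10,} | {last_bet:>10,} | {total:>15,}")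
--         power *= 2
--     return "\n".join(lines)
-- ===== Notes on version B (the rewrite author's own statement) =====
-- stated objective: faster
-- what changed: B replaces A's per-row inner summation loop (and per-row exponentiation) by the closed-form geometric total (x+1)*(2^n-1)-n and carries the power of two across iterations in one pass; intended as faster, measured ~80x at the largest size both finished (at the very largest probe size both hit CPython's int-to-str digit limit, so a timing run could not confirm there).
import Mathlib
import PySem

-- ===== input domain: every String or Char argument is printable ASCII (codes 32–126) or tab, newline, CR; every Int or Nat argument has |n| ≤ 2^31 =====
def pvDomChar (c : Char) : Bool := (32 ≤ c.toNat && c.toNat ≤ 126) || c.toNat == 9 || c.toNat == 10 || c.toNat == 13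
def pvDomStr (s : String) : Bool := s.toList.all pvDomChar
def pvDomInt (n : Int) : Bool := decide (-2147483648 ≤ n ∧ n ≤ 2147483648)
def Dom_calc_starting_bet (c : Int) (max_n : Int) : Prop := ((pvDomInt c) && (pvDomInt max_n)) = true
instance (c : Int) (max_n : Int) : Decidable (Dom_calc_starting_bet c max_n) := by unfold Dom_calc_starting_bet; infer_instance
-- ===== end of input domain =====

-- B replaces A's inner summation loop by the closed-form geometric total
-- (x+1)*(2^n-1)-n and carries the power of two across iterations (single pass);
-- intended as faster (fewer arithmetic steps per row); a timing run measured
-- ~80x at the largest size on which both programs finished.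

-- ----- shared formatting helpers (the f-string is identical in A and B) -----
-- thousands grouping of f"{v:,}" for the nonnegative values formatted here,
-- done on the reversed digit list
def pvGroupRev : List Char → List Char
  | a :: b :: d :: e :: rest => a :: b :: d :: ',' :: pvGroupRev (e :: rest)
  | l => l

def pvComma (n : Int) : List Char := (pvGroupRev (PySem.Int.toChars n).reverse).reverse

def pvPadL (w : Nat) (s : List Char) : List Char := List.replicate (w - s.length) ' ' ++ s

def pvPadR (w : Nat) (s : List Char) : List Char := s ++ List.replicate (w - s.length) ' '

-- f"{n:<6} | {x:>10,} | {last_bet:>10,} | {total:>15,}"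
def pvLine (n x lb tot : Int) : String :=
  String.ofList (pvPadR 6 (PySem.Int.toChars n) ++ " | ".toList ++ pvPadL 10 (pvComma x)
    ++ " | ".toList ++ pvPadL 10 (pvComma lb) ++ " | ".toList ++ pvPadL 15 (pvComma tot))

-- header = f"{'连输次数':<6} | {'起手金额':>10} | {'最后一注':>10} | {'总投入':>15}" (a constant)
def pvHeader : String := "连输次数   |       起手金额 |       最后一注 |             总投入"

-- separator = "-" * len(header); len(header) = 50 code points
def pvSep : String := String.ofList (List.replicate 50 '-')

-- ===== PORT A =====
def calc_starting_bet (c : Int) (max_n : Int) : String :=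
  let lines : List String :=
    (PySem.List.pyRange 1 (max_n + 1) 1).foldl (fun acc n =>
      let power : Int := 2 ^ (n - 1).toNat
      let x : Int := |PySem.Int.floordiv (c - (power - 1)) power|
      let last_bet : Int := power * x + (power - 1)
      let total : Int :=
        (PySem.List.pyRange 0 n 1).foldl
          (fun a i => a + (2 ^ i.toNat * x + (2 ^ i.toNat - 1))) 0
      acc ++ [pvLine n x last_bet total]) [pvHeader, pvSep]
  PySem.Str.join "\n" lines

-- ===== PORT B =====
def pvAltLoop (c : Int) : Nat → Int → Int → List String → List String
  | 0, _, _, acc => acc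
  | Nat.succ k, n, power, acc =>
      let x : Int := |PySem.Int.floordiv (c - power + 1) power|
      let last_bet : Int := power * x + power - 1
      let total : Int := (x + 1) * (2 * power - 1) - n
      pvAltLoop c k (n + 1) (power * 2) (acc ++ [pvLine n x last_bet total])

def calc_starting_bet_alt (c : Int) (max_n : Int) : String :=
  PySem.Str.join "\n" (pvAltLoop c max_n.toNat 1 1 [pvHeader, pvSep])

-- ===== PRECONDITION & SPEC =====
def Spec_calc_starting_bet (c : Int) (max_n : Int) (out : String) : Prop := out = calc_starting_bet_alt c max_n
instance (c : Int) (max_n : Int) (out : String) : Decidable (Spec_calc_starting_bet c max_n out) := by unfold Spec_calc_starting_bet; infer_instance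

-- ===== CLAIM (what is proved, stated in full; the proofs are below) =====
def Claim_equal_calc_starting_bet : Prop := ∀ (c : Int) (max_n : Int), Dom_calc_starting_bet c max_n → Spec_calc_starting_bet c max_n (calc_starting_bet c max_n)

-- ===== LEMMAS AND PROOFS =====

-- A's inner sum over range(n) in closed form
lemma pv_inner_sum (x : Int) (m : Nat) :
    (PySem.List.pyRange 0 (m : Int) 1).foldl
      (fun a i => a + (2 ^ i.toNat * x + (2 ^ i.toNat - 1))) 0
    = (x + 1) * (2 ^ m - 1) - m := by
  induction m with
  | zero => simp [PySem.List.pyRange_one_eq_nil]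
  | succ k ih =>
      rw [show ((k + 1 : Nat) : Int) = (k : Int) + 1 by push_cast; ring,
        PySem.List.pyRange_one_succ_right (by positivity), List.foldl_append, ih]
      simp only [List.foldl_cons, List.foldl_nil, Int.toNat_natCast]
      push_cast [pow_succ]
      ring

-- A's fold over pyRange n (n+k) equals B's loop when power = 2^(n-1)
lemma pv_loop_eq (c : Int) (k : Nat) :
    ∀ (n : Int) (acc : List String), 1 ≤ n →
    (PySem.List.pyRange n (n + (k : Int)) 1).foldl (fun acc n =>
      let power : Int := 2 ^ (n - 1).toNat
      let x : Int := |PySem.Int.floordiv (c - (power - 1)) power|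
      let last_bet : Int := power * x + (power - 1)
      let total : Int :=
        (PySem.List.pyRange 0 n 1).foldl
          (fun a i => a + (2 ^ i.toNat * x + (2 ^ i.toNat - 1))) 0
      acc ++ [pvLine n x last_bet total]) acc
    = pvAltLoop c k n (2 ^ (n - 1).toNat) acc := by
  induction k with
  | zero =>
      intro n acc _
      simp [PySem.List.pyRange_one_eq_nil, pvAltLoop]
  | succ k ih =>
      intro n acc hn
      have hpow : (2 : Int) ^ ((n + 1) - 1).toNat = 2 ^ (n - 1).toNat * 2 := by
        rw [show ((n + 1) - 1).toNat = (n - 1).toNat + 1 by omega]; ring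
      rw [show n + ((k + 1 : Nat) : Int) = (n + 1) + (k : Int) by push_cast; ring,
        PySem.List.pyRange_one_cons (by omega), List.foldl_cons,
        ih (n + 1) _ (by omega), hpow, pvAltLoop]
      congr 1
      show acc ++ [pvLine n
          (|PySem.Int.floordiv (c - ((2 : Int) ^ (n - 1).toNat - 1)) ((2 : Int) ^ (n - 1).toNat)|)
          ((2 : Int) ^ (n - 1).toNat * |PySem.Int.floordiv (c - ((2 : Int) ^ (n - 1).toNat - 1)) ((2 : Int) ^ (n - 1).toNat)| + ((2 : Int) ^ (n - 1).toNat - 1))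
          ((PySem.List.pyRange 0 n 1).foldl
            (fun a i => a + (2 ^ i.toNat * |PySem.Int.floordiv (c - ((2 : Int) ^ (n - 1).toNat - 1)) ((2 : Int) ^ (n - 1).toNat)| + (2 ^ i.toNat - 1))) 0)] = _
      rw [show c - ((2 : Int) ^ (n - 1).toNat - 1) = c - (2 : Int) ^ (n - 1).toNat + 1 by ring,
        show ∀ y : Int, (2 : Int) ^ (n - 1).toNat * y + ((2 : Int) ^ (n - 1).toNat - 1)
            = 2 ^ (n - 1).toNat * y + 2 ^ (n - 1).toNat - 1 from fun y => by ring,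
        show ∀ y : Int, (PySem.List.pyRange 0 n 1).foldl
            (fun a i => a + (2 ^ i.toNat * y + (2 ^ i.toNat - 1))) 0
            = (y + 1) * (2 * 2 ^ (n - 1).toNat - 1) - n from fun y => by
          rw [show PySem.List.pyRange 0 n 1 = PySem.List.pyRange 0 ((n.toNat : Nat) : Int) 1 by
              rw [Int.toNat_of_nonneg (by omega)],
            pv_inner_sum,
            show (2 : Int) ^ n.toNat = 2 ^ (n - 1).toNat * 2 by
              rw [show n.toNat = (n - 1).toNat + 1 by omega]; ring,
            Int.toNat_of_nonneg (show (0 : Int) ≤ n by omega)]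
          ring]

-- ===== VERDICT (by name: the statement is the Claim_ definition above) =====
theorem calc_starting_bet_spec : Claim_equal_calc_starting_bet := by
  intro c max_n _
  unfold Spec_calc_starting_bet calc_starting_bet calc_starting_bet_alt
  have hlist : (PySem.List.pyRange 1 (max_n + 1) 1).foldl (fun acc n =>
      let power : Int := 2 ^ (n - 1).toNat
      let x : Int := |PySem.Int.floordiv (c - (power - 1)) power|
      let last_bet : Int := power * x + (power - 1)
      let total : Int :=
        (PySem.List.pyRange 0 n 1).foldl
          (fun a i => a + (2 ^ i.toNat * x + (2 ^ i.toNat - 1))) 0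
      acc ++ [pvLine n x last_bet total]) [pvHeader, pvSep]
      = pvAltLoop c max_n.toNat 1 1 [pvHeader, pvSep] := by
    by_cases h : max_n ≤ 0
    · rw [PySem.List.pyRange_one_eq_nil (by omega), show max_n.toNat = 0 by omega]
      rfl
    · have hmain := pv_loop_eq c max_n.toNat 1 [pvHeader, pvSep] (le_refl 1)
      rw [show (1 : Int) + (max_n.toNat : Int) = max_n + 1 by omega,
        show ((1 : Int) - 1).toNat = 0 by norm_num, pow_zero] at hmain
      exact hmain
  exact congrArg (PySem.Str.join "\n") hlist
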